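-- pv_equiv track=rewrite | github.com/ahmadj1801/NBA-Predictions | Application/predictor.py | team_display
-- ===== SOURCE A (Python) =====
-- def team_display(teams):
--     display = 'Select an option below or enter -1 to exit:\n'
--     for i in range(len(teams)):
--         if i % 5 == 0:
--             display = display + '\n{} - {}'.format(str(i), teams[i])
--         else:
--             display = display + '\t\t{} - {}'.format(str(i), teams[i])
--     return display
-- ===== SOURCE B (Python) =====
-- def team_display(teams):
--     header = 'Select an option below or enter -1 to exit:\n'
--     rows = []
--     for base in range(0, len(teams), 5):
--         chunk = teams[base:base + 5]
--         rows.append('\n' + '\t\t'.join(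
--             '{} - {}'.format(base + j, team) for j, team in enumerate(chunk)))
--     return header + ''.join(rows)
-- ===== Notes on version B (the rewrite author's own statement) =====
-- stated objective: alternative
-- what changed: B partitions teams into consecutive chunks of five and emits one row per chunk ('\n' plus a '\t\t'-join of the chunk's 'i - team' cells), replacing A's single flat loop with a per-index i%5 branch deciding the separator.
import Mathlib
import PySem

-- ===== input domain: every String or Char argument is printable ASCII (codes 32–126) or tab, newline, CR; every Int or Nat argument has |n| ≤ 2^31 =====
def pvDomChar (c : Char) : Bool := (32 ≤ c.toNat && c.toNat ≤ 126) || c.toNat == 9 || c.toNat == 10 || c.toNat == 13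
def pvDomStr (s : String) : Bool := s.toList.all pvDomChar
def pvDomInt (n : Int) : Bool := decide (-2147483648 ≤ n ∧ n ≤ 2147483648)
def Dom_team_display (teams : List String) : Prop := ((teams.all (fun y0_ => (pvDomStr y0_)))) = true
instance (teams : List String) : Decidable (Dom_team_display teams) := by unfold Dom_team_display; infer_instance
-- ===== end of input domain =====

-- B builds the menu row-by-row (chunks of five joined with '\t\t') instead of A's flat per-index i%5 branch; objective: alternative decomposition.

-- ===== PORT A =====
def team_display (teams : List String) : String :=
  (PySem.List.pyRange 0 teams.length 1).foldl
    (fun display i =>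
      if PySem.Int.mod i 5 == 0 then
        display ++ "\n" ++ PySem.Int.toStr i ++ " - " ++ PySem.List.pyGetD teams i ""
      else
        display ++ "\t\t" ++ PySem.Int.toStr i ++ " - " ++ PySem.List.pyGetD teams i "")
    "Select an option below or enter -1 to exit:\n"

-- ===== PORT B =====
def team_display_alt (teams : List String) : String :=
  let rows := (PySem.List.pyRange 0 teams.length 5).foldl
    (fun rows base =>
      let chunk := PySem.List.slice teams (some base) (some (base + 5))
      rows ++ ["\n" ++ PySem.Str.join "\t\t"
        ((PySem.List.enumerate chunk).map
          (fun p => PySem.Int.toStr (base + p.1) ++ " - " ++ p.2))]) []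
  "Select an option below or enter -1 to exit:\n" ++ PySem.Str.join "" rows

-- ===== PRECONDITION & SPEC =====
def Spec_team_display (teams : List String) (out : String) : Prop := out = team_display_alt teams
instance (teams : List String) (out : String) : Decidable (Spec_team_display teams out) := by unfold Spec_team_display; infer_instance

-- ===== CLAIM (what is proved, stated in full; the proofs are below) =====
def Claim_equal_team_display : Prop := ∀ (teams : List String), Dom_team_display teams → Spec_team_display teams (team_display teams)

-- ===== LEMMAS AND PROOFS =====

-- the per-index piece of A's output, as a character list
def pvPiece (teams : List String) (i : Int) : List Char :=
  (if PySem.Int.mod i 5 == 0 then "\n".toList else "\t\t".toList)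
  ++ (PySem.Int.toStr i).toList ++ " - ".toList ++ (PySem.List.pyGetD teams i "").toList

-- one row of B, as a string (the function the foldl in team_display_alt appends)
def pvRow (teams : List String) (b : Int) : String :=
  "\n" ++ PySem.Str.join "\t\t"
    ((PySem.List.enumerate (PySem.List.slice teams (some b) (some (b + 5)))).map
      (fun p => PySem.Int.toStr (b + p.1) ++ " - " ++ p.2))

lemma pv_foldl_toList (l : List Int) (f : Int → String) (acc : String) :
    (l.foldl (fun s i => s ++ f i) acc).toList
      = acc.toList ++ (l.map (fun i => (f i).toList)).flatten := by
  induction l generalizing acc with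
  | nil => simp
  | cons x xs ih => simp [List.foldl_cons, ih]

lemma pv_A_toList (teams : List String) :
    (team_display teams).toList
      = "Select an option below or enter -1 to exit:\n".toList
        ++ ((PySem.List.pyRange 0 teams.length 1).map (pvPiece teams)).flatten := by
  unfold team_display
  have hfun : (fun (display : String) (i : Int) =>
      if PySem.Int.mod i 5 == 0 then
        display ++ "\n" ++ PySem.Int.toStr i ++ " - " ++ PySem.List.pyGetD teams i ""
      else
        display ++ "\t\t" ++ PySem.Int.toStr i ++ " - " ++ PySem.List.pyGetD teams i "")
      = (fun s i => s ++ ((if PySem.Int.mod i 5 == 0 then "\n" else "\t\t")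
          ++ PySem.Int.toStr i ++ " - " ++ PySem.List.pyGetD teams i "")) := by
    funext s i
    by_cases h : (PySem.Int.mod i 5 == 0) = true
    · rw [if_pos h, if_pos h]; simp [String.append_assoc]
    · rw [if_neg h, if_neg h]; simp [String.append_assoc]
  rw [hfun, pv_foldl_toList]
  congr 1
  congr 1
  apply List.map_congr_left
  intro i _
  unfold pvPiece
  by_cases h : (PySem.Int.mod i 5 == 0) = true
  · rw [if_pos h, if_pos h]; simp [String.append_assoc]
  · rw [if_neg h, if_neg h]; simp [String.append_assoc]

lemma pv_join_empty (ps : List (List Char)) :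
    PySem.Chars.join [] ps = ps.flatten := by
  induction ps with
  | nil => simp [PySem.Chars.join_nil]
  | cons p ps ih =>
      cases ps with
      | nil => simp [PySem.Chars.join_singleton]
      | cons q rest =>
          rw [PySem.Chars.join_cons_cons]
          simp only [List.flatten_cons]
          rw [ih]
          simp

lemma pv_join_tabs (c : List Char) (cs : List (List Char)) :
    PySem.Chars.join "\t\t".toList (c :: cs)
      = c ++ (cs.map (fun d => "\t\t".toList ++ d)).flatten := by
  induction cs generalizing c with
  | nil => simp [PySem.Chars.join_singleton]
  | cons d ds ih =>
      rw [PySem.Chars.join_cons_cons, ih]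
      simp

lemma pv_range5_nil (a b : Int) (h : b ≤ a) : PySem.List.pyRange a b 5 = [] := by
  rw [PySem.List.pyRange_of_pos a b (by norm_num)]
  simp [show ¬ a < b by omega]

lemma pv_range5_cons (a b : Int) (h : a < b) :
    PySem.List.pyRange a b 5 = a :: PySem.List.pyRange (a + 5) b 5 := by
  rw [PySem.List.pyRange_of_pos a b (by norm_num),
      PySem.List.pyRange_of_pos (a + 5) b (by norm_num), if_pos h]
  by_cases h5 : a + 5 < b
  · rw [if_pos h5]
    rw [show ((b - a + 5 - 1) / 5).toNat = ((b - (a + 5) + 5 - 1) / 5).toNat + 1 from by omega]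
    rw [List.range_succ_eq_map]
    simp only [List.map_cons, List.map_map]
    congr 1
    · norm_num
    · apply List.map_congr_left
      intro k _
      simp [Function.comp]
      push_cast
      ring
  · rw [if_neg h5]
    rw [show ((b - a + 5 - 1) / 5).toNat = 1 from by omega]
    simp

-- one row of B equals the concatenation of A's per-index pieces over that chunk's indices
lemma pv_row_eq (teams : List String) (base : Nat) (hb : base % 5 = 0)
    (hlt : base < teams.length) :
    (pvRow teams (base : Int)).toList
      = ((PySem.List.pyRange (base : Int) ((min (base + 5) teams.length : Nat) : Int) 1).map
          (pvPiece teams)).flatten := by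
  have hcast : ((base : Int) + 5) = ((base + 5 : Nat) : Int) := by push_cast; ring
  have hchunk : PySem.List.slice teams (some (base : Int)) (some ((base : Int) + 5))
      = (teams.drop base).take 5 := by
    rw [hcast, PySem.List.slice_natCast]
    congr 1
    omega
  rcases hch : (teams.drop base).take 5 with _ | ⟨t, rest⟩
  · exfalso
    have := congrArg List.length hch
    simp at this
    omega
  have hlen : ((teams.drop base).take 5).length = min 5 (teams.length - base) := by simp
  rw [hch] at hlen
  simp only [List.length_cons] at hlen
  have hget : ∀ (j : Nat) (hj : j < rest.length + 1),
      (t :: rest)[j] = teams[base + j]'(by omega) := by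
    intro j hj
    rw [List.getElem_of_eq hch.symm, List.getElem_take, List.getElem_drop]
  -- left side
  unfold pvRow
  rw [hchunk, hch]
  simp only [String.toList_append, PySem.Str.toList_join, List.map_map,
    PySem.List.enumerate_cons, List.map_cons]
  rw [pv_join_tabs]
  -- right side
  have hm : (base : Int) < ((min (base + 5) teams.length : Nat) : Int) := by push_cast; omega
  rw [PySem.List.pyRange_one_cons hm]
  simp only [List.map_cons, List.flatten_cons]
  have hbmod : PySem.Int.mod (base : Int) 5 = 0 := by
    rw [PySem.Int.mod_eq_emod_of_pos (by norm_num)]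
    omega
  have hfirst : pvPiece teams (base : Int)
      = "\n".toList ++ ((PySem.Int.toStr ((base : Int) + 0)).toList ++ " - ".toList ++ t.toList) := by
    unfold pvPiece
    rw [hbmod]
    have : PySem.List.pyGetD teams (base : Int) "" = teams[base]'(by omega) := by
      rw [PySem.List.pyGetD_eq_getElem teams "" (by omega) (by push_cast; omega)]
      simp
    rw [this]
    have := hget 0 (by omega)
    simp at this
    simp [this, String.append_assoc]
  rw [hfirst]
  simp only [List.append_assoc]
  congr 2
  -- remaining: tail of the row vs tail pieces
  have hmaps : (PySem.List.pyRange ((base : Int) + 1) ((min (base + 5) teams.length : Nat) : Int)).map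
        (pvPiece teams)
      = (PySem.List.enumerate rest 1).map
          (fun p => "\t\t".toList ++ ((PySem.Int.toStr ((base : Int) + p.1)).toList
            ++ " - ".toList ++ p.2.toList)) := by
    apply List.ext_getElem
    · rw [List.length_map, List.length_map, PySem.List.length_pyRange_one,
        PySem.List.length_enumerate]
      omega
    · intro k hk1 hk2
      rw [List.getElem_map, List.getElem_map, PySem.List.getElem_pyRange_one,
        PySem.List.getElem_enumerate]
      have hkr : k < rest.length := by
        rw [List.length_map, PySem.List.length_enumerate] at hk2
        exact hk2
      have hmodk : PySem.Int.mod ((base : Int) + 1 + (k : Int)) 5 = 1 + (k : Int) := by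
        rw [PySem.Int.mod_eq_emod_of_pos (by norm_num)]
        omega
      have hne : ¬ (PySem.Int.mod ((base : Int) + 1 + (k : Int)) 5 == 0) = true := by
        rw [hmodk]
        simp
        omega
      unfold pvPiece
      rw [if_neg hne]
      have hgd : PySem.List.pyGetD teams ((base : Int) + 1 + (k : Int)) ""
          = teams[base + (1 + k)]'(by omega) := by
        rw [PySem.List.pyGetD_eq_getElem teams "" (by omega) (by push_cast; omega)]
        congr 1
        omega
      have hrk : rest[k] = teams[base + (1 + k)]'(by omega) := by
        have := hget (1 + k) (by omega)
        simpa [Nat.add_comm 1 k] using this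
      rw [hgd, ← hrk]
      have : (base : Int) + 1 + (k : Int) = (base : Int) + (1 + (k : Int)) := by ring
      rw [this]
      simp [String.append_assoc]
  rw [hmaps]
  rw [show ((0:Int) + 1) = 1 from by norm_num]
  congr 1
  congr 1
  apply congrArg List.flatten
  rw [List.map_map]
  apply List.map_congr_left
  intro p _
  simp [Function.comp]

set_option maxHeartbeats 1600000 in
lemma pv_main (q : Nat) : ∀ (teams : List String) (base : Nat), base % 5 = 0 →
    teams.length ≤ base + 5 * q →
    ((PySem.List.pyRange (base : Int) teams.length 1).map (pvPiece teams)).flatten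
      = ((PySem.List.pyRange (base : Int) teams.length 5).map
          (fun b => (pvRow teams b).toList)).flatten := by
  induction q with
  | zero =>
      intro teams base _ hn
      rw [PySem.List.pyRange_one_eq_nil (by push_cast; omega),
        pv_range5_nil _ _ (by push_cast; omega)]
      simp
  | succ q ih =>
      intro teams base hb hn
      by_cases hlt : base < teams.length
      · have hm1 : (base : Int) ≤ ((min (base + 5) teams.length : Nat) : Int) := by push_cast; omega
        have hm2 : ((min (base + 5) teams.length : Nat) : Int) ≤ (teams.length : Int) := by
          push_cast; omega
        rw [PySem.List.pyRange_one_append (base : Int) _ (teams.length : Int) hm1 hm2,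
            pv_range5_cons _ _ (by push_cast; omega)]
        simp only [List.map_append, List.map_cons, List.flatten_append, List.flatten_cons]
        rw [← pv_row_eq teams base hb hlt]
        refine congr_arg₂ (· ++ ·) rfl ?_
        by_cases h5 : base + 5 ≤ teams.length
        · rw [show (min (base + 5) teams.length) = base + 5 from by omega]
          have h := ih teams (base + 5) (by omega) (by omega)
          push_cast at h ⊢
          rw [h]
        · rw [show (min (base + 5) teams.length) = teams.length from by omega,
            PySem.List.pyRange_one_eq_nil (by push_cast; omega),
            pv_range5_nil _ _ (by push_cast; omega)]
          simp
      · rw [PySem.List.pyRange_one_eq_nil (by push_cast; omega),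
          pv_range5_nil _ _ (by push_cast; omega)]
        simp

lemma pv_B_toList (teams : List String) :
    (team_display_alt teams).toList
      = "Select an option below or enter -1 to exit:\n".toList
        ++ ((PySem.List.pyRange 0 teams.length 5).map
            (fun b => (pvRow teams b).toList)).flatten := by
  have h1 : team_display_alt teams
      = "Select an option below or enter -1 to exit:\n"
        ++ PySem.Str.join "" ((PySem.List.pyRange 0 teams.length 5).map (pvRow teams)) := by
    show "Select an option below or enter -1 to exit:\n"
        ++ PySem.Str.join ""
          ((PySem.List.pyRange 0 teams.length 5).foldl
            (fun rows base => rows ++ [pvRow teams base]) []) = _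
    rw [PySem.List.foldl_append_singleton_eq_map (pvRow teams)
      (PySem.List.pyRange 0 teams.length 5) []]
    rw [List.nil_append]
  rw [h1]
  simp only [String.toList_append, PySem.Str.toList_join, List.map_map]
  congr 1
  rw [show String.toList "" = ([] : List Char) from rfl, pv_join_empty]
  rfl

-- ===== VERDICT (by name: the statement is the Claim_ definition above) =====
theorem team_display_spec : Claim_equal_team_display := by
  intro teams _
  unfold Spec_team_display
  rw [← String.toList_inj, pv_A_toList, pv_B_toList]
  congr 1
  have h := pv_main teams.length teams 0 (by omega) (by omega)
  simpa using h
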